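-- pv_equiv track=rewrite | github.com/hlld/genetic_algorithm | genetic_algorithm.py | calc_best_unity
-- ===== SOURCE A (Python) =====
-- def calc_conflict(location_0, location_1):
--     if abs(location_0[0] - location_1[0]) != abs(location_0[1] - location_1[1]) \
--             and location_0[0] != location_1[0] and location_0[1] != location_1[1]:
--         return True
--     return False
--
-- def calc_resilience(unity):
--     length = len(unity)
--     result = 0
--     for ri in range(length):
--         for ci in range(ri + 1, length):
--             if calc_conflict([ri, unity[ri]], [ci, unity[ci]]):
--                 result = result + 1
--     return result
--
-- def calc_best_unity(group_list):
--     best_result = -1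
--     index = 0
--     for k in range(len(group_list)):
--         result = calc_resilience(group_list[k])
--         if result > best_result:
--             best_result = result
--             index = k
--     return group_list[index]
-- ===== SOURCE B (Python) =====
-- def calc_best_unity(group_list):
--     # Resilience via hash buckets: non-attacking pairs = C(n,2) - collisions,
--     # counting same-column / same-diagonal pairs incrementally in O(n).
--     def resilience(unity):
--         n = len(unity)
--         cols, d1, d2 = {}, {}, {}
--         attacks = 0
--         for i, v in enumerate(unity):
--             attacks += cols.get(v, 0) + d1.get(i - v, 0) + d2.get(i + v, 0)
--             cols[v] = cols.get(v, 0) + 1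
--             d1[i - v] = d1.get(i - v, 0) + 1
--             d2[i + v] = d2.get(i + v, 0) + 1
--         return n * (n - 1) // 2 - attacks
--     best = max(range(len(group_list)), key=lambda k: resilience(group_list[k]))
--     return group_list[best]
-- ===== Notes on version B (the rewrite author's own statement) =====
-- stated objective: faster
-- what changed: Resilience of each board is computed in one pass with hash buckets (column and both diagonal keys), so resilience = C(n,2) - collisions, replacing A's O(n^2) pairwise scan; the best board is picked with max(range(len), key=...).
-- outside the precondition, e.g. on calc_best_unity([]): A raises IndexError, B raises ValueError
import Mathlib
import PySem

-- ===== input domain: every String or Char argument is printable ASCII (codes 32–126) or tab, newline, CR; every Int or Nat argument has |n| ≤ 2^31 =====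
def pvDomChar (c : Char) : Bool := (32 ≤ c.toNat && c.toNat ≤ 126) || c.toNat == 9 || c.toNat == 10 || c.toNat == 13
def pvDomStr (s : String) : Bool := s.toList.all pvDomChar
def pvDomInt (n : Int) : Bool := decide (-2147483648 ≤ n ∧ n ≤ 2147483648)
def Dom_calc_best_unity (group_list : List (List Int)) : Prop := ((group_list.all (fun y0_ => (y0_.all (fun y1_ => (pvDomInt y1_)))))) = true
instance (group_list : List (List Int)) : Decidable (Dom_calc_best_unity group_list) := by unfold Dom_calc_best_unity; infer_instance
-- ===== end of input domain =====

-- B replaces A's O(n^2) pairwise scan per board by hash-bucket collision counting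
-- (resilience = C(n,2) - same-column/diagonal collisions) and picks the best board
-- with max(range(len), key=...); objective: faster (asymptotic, O(g·n) vs O(g·n^2)).

-- ===== PORT A =====
def pv_calc_conflict (location_0 location_1 : Int × Int) : Bool :=
  if (location_0.1 - location_1.1).natAbs ≠ (location_0.2 - location_1.2).natAbs
      ∧ location_0.1 ≠ location_1.1 ∧ location_0.2 ≠ location_1.2 then
    true
  else
    false

def pv_calc_resilience (unity : List Int) : Int :=
  let length : Int := unity.length
  (PySem.List.pyRange 0 length).foldl (fun result ri =>
    (PySem.List.pyRange (ri + 1) length).foldl (fun result ci =>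
      if pv_calc_conflict (ri, PySem.List.pyGetD unity ri 0) (ci, PySem.List.pyGetD unity ci 0)
      then result + 1 else result) result) 0

def calc_best_unity (group_list : List (List Int)) : List Int :=
  let st := (PySem.List.pyRange 0 (group_list.length : Int)).foldl
    (fun (st : Int × Int) k =>
      let result := pv_calc_resilience (PySem.List.pyGetD group_list k [])
      if result > st.1 then (result, k) else st) (-1, 0)
  PySem.List.pyGetD group_list st.2 []

-- ===== PORT B =====
def pvB_resilience (unity : List Int) : Int :=
  let n : Int := unity.length
  let st := (PySem.List.enumerate unity 0).foldl
    (fun (st : PySem.Dict Int Int × PySem.Dict Int Int × PySem.Dict Int Int × Int) iv =>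
      let cols := st.1; let d1 := st.2.1; let d2 := st.2.2.1; let attacks := st.2.2.2
      let i := iv.1; let v := iv.2
      let attacks := attacks + cols.getD v 0 + d1.getD (i - v) 0 + d2.getD (i + v) 0
      (cols.insert v (cols.getD v 0 + 1), d1.insert (i - v) (d1.getD (i - v) 0 + 1),
       d2.insert (i + v) (d2.getD (i + v) 0 + 1), attacks))
    (PySem.Dict.empty, PySem.Dict.empty, PySem.Dict.empty, 0)
  PySem.Int.floordiv (n * (n - 1)) 2 - st.2.2.2

def calc_best_unity_alt (group_list : List (List Int)) : List Int :=
  match PySem.List.max? (PySem.List.pyRange 0 (group_list.length : Int))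
      (fun k => pvB_resilience (PySem.List.pyGetD group_list k [])) with
  | some best => PySem.List.pyGetD group_list best []
  | none => []   -- unreachable under Pre_ (Python max raises ValueError on an empty group_list)

-- ===== PRECONDITION & SPEC =====
-- On [] A raises IndexError (group_list[0]) and B raises ValueError (max of empty range).
def Pre_calc_best_unity (group_list : List (List Int)) : Prop := group_list ≠ []
instance (group_list : List (List Int)) : Decidable (Pre_calc_best_unity group_list) := by
  unfold Pre_calc_best_unity; infer_instance
def pvWitness_calc_best_unity : List (List Int) := [[0]]

def Spec_calc_best_unity (group_list : List (List Int)) (out : List Int) : Prop := out = calc_best_unity_alt group_list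
instance (group_list : List (List Int)) (out : List Int) : Decidable (Spec_calc_best_unity group_list out) := by unfold Spec_calc_best_unity; infer_instance

-- ===== CLAIM (what is proved, stated in full; the proofs are below) =====
def Claim_equal_calc_best_unity : Prop := ∀ (group_list : List (List Int)), Dom_calc_best_unity group_list → Pre_calc_best_unity group_list → Spec_calc_best_unity group_list (calc_best_unity group_list)

-- ===== LEMMAS AND PROOFS =====

-- 0/1 indicator of A's conflict test (a non-attacking pair)
def cfInd (p q : Int × Int) : Int := if pv_calc_conflict p q then 1 else 0

-- 0/1+0/1+0/1 count of column / both-diagonal collisions of two placed queens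
def afInd (p q : Int × Int) : Int :=
  (if p.2 = q.2 then 1 else 0) + (if p.1 - p.2 = q.1 - q.2 then 1 else 0)
    + (if p.1 + p.2 = q.1 + q.2 then 1 else 0)

-- sum of h over all ordered pairs (earlier element first)
def pairSum (h : Int × Int → Int × Int → Int) : List (Int × Int) → Int
  | [] => 0
  | p :: rest => (rest.map (h p)).sum + pairSum h rest

-- number of such pairs
def numPairs : List (Int × Int) → Int
  | [] => 0
  | _ :: rest => (rest.length : Int) + numPairs rest

-- the three collision buckets are mutually exclusive for distinct rows
lemma point_lemma (p q : Int × Int) (h : p.1 < q.1) : cfInd p q + afInd p q = 1 := by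
  obtain ⟨a, b⟩ := p; obtain ⟨c, d⟩ := q
  have hconf : (pv_calc_conflict (a, b) (c, d) = true)
      ↔ ((a - c).natAbs ≠ (b - d).natAbs ∧ a ≠ c ∧ b ≠ d) := by
    unfold pv_calc_conflict
    split
    · simp_all
    · simp_all
      tauto
  simp only [cfInd, afInd, hconf]
  split_ifs <;> omega

lemma pairSum_add_pairSum (l : List (Int × Int)) (hl : l.Pairwise (fun p q => p.1 < q.1)) :
    pairSum cfInd l + pairSum afInd l = numPairs l := by
  induction l with
  | nil => simp [pairSum, numPairs]
  | cons p rest ih =>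
    rcases List.pairwise_cons.mp hl with ⟨hp, hrest⟩
    have hsum : (rest.map (cfInd p)).sum + (rest.map (afInd p)).sum = (rest.length : Int) := by
      rw [← PySem.List.sum_map_add_int]
      have : rest.map (fun q => cfInd p q + afInd p q) = rest.map (fun _ => (1 : Int)) :=
        List.map_congr_left (fun q hq => point_lemma p q (hp q hq))
      rw [this, PySem.List.sum_map_const_int]; ring
    simp only [pairSum, numPairs]
    have := ih hrest
    linarith

lemma two_mul_numPairs (l : List (Int × Int)) :
    2 * numPairs l = (l.length : Int) * ((l.length : Int) - 1) := by
  induction l with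
  | nil => simp [numPairs]
  | cons p rest ih =>
    simp only [numPairs, List.length_cons]
    push_cast
    linear_combination ih

lemma pairSum_nonneg (l : List (Int × Int)) : 0 ≤ pairSum cfInd l := by
  induction l with
  | nil => simp [pairSum]
  | cons p rest ih =>
    have : 0 ≤ (rest.map (cfInd p)).sum := by
      apply List.sum_nonneg
      intro x hx
      rcases List.mem_map.mp hx with ⟨q, _, rfl⟩
      unfold cfInd; split <;> norm_num
    simp only [pairSum]; linarith

-- ===== A-side characterisation =====

lemma inner_fold_eq (u : List Int) (p : Int × Int) (a : Int) (res0 : Int) :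
    (PySem.List.pyRange a (u.length : Int)).foldl (fun res ci =>
        if pv_calc_conflict p (ci, PySem.List.pyGetD u ci 0) then res + 1 else res) res0
      = res0 + ((PySem.List.pyRange a (u.length : Int)).map
          (fun ci => cfInd p (ci, PySem.List.pyGetD u ci 0))).sum := by
  rw [PySem.List.foldl_congr_mem _ _
        (fun res ci => res + cfInd p (ci, PySem.List.pyGetD u ci 0)) _
        (by intro acc x _
            by_cases hc : pv_calc_conflict p (x, PySem.List.pyGetD u x 0) = true <;>
              simp [hc, cfInd])]
  exact PySem.List.foldl_add _ _ _

lemma pairSum_map_pyRange (f : Int → Int × Int) (h : Int × Int → Int × Int → Int) (n : Int) :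
    ∀ (k : Nat) (a : Int), (n - a).toNat = k →
      pairSum h ((PySem.List.pyRange a n).map f)
        = ((PySem.List.pyRange a n).map
            (fun x => ((PySem.List.pyRange (x + 1) n).map (fun y => h (f x) (f y))).sum)).sum := by
  intro k
  induction k with
  | zero =>
    intro a ha
    rw [PySem.List.pyRange_one_eq_nil (by omega)]
    simp [pairSum]
  | succ k ih =>
    intro a ha
    rw [PySem.List.pyRange_one_cons (by omega)]
    simp only [List.map_cons, pairSum, List.sum_cons]
    rw [ih (a + 1) (by omega)]
    rw [List.map_map]
    rfl

lemma resA_eq (u : List Int) :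
    pv_calc_resilience u = pairSum cfInd (PySem.List.enumerate u 0) := by
  have hen := PySem.List.enumerate_eq_map_pyRange u 0
  unfold pv_calc_resilience
  rw [PySem.List.foldl_congr_mem _ _
        (fun res ri => res + ((PySem.List.pyRange (ri + 1) (u.length : Int)).map
          (fun ci => cfInd (ri, PySem.List.pyGetD u ri 0) (ci, PySem.List.pyGetD u ci 0))).sum) _
        (by intro acc x _; exact inner_fold_eq u (x, PySem.List.pyGetD u x 0) (x + 1) acc)]
  rw [PySem.List.foldl_add]
  rw [hen, pairSum_map_pyRange (fun j => (j, PySem.List.pyGetD u j 0)) cfInd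
        (PySem.List.len u) ((PySem.List.len u) - 0).toNat 0 rfl]
  simp [PySem.List.len]

-- ===== B-side characterisation =====

def mkCnt (l : List Int) : PySem.Dict Int Int :=
  l.foldl (fun d x => d.insert x (d.getD x 0 + 1)) PySem.Dict.empty

def cnt (pre : List (Int × Int)) (q : Int × Int) : Int :=
  ((pre.map (·.2)).count q.2 : Int) + ((pre.map (fun p => p.1 - p.2)).count (q.1 - q.2) : Int)
    + ((pre.map (fun p => p.1 + p.2)).count (q.1 + q.2) : Int)

lemma cnt_append (pre : List (Int × Int)) (q r : Int × Int) :
    cnt (pre ++ [q]) r = cnt pre r + afInd q r := by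
  unfold cnt afInd
  simp only [List.map_append, List.map_cons, List.map_nil, List.count_append]
  push_cast
  have hs : ∀ (x v : Int), ((List.count v [x] : Nat) : Int) = if v = x then 1 else 0 := by
    intro x v
    by_cases h : v = x
    · simp [h]
    · simp [h, Ne.symm h]
  rw [hs, hs, hs]
  split_ifs <;> omega

lemma Bfold_att (rest : List (Int × Int)) :
    ∀ (pre : List (Int × Int)) (a0 : Int),
      (rest.foldl
        (fun (st : PySem.Dict Int Int × PySem.Dict Int Int × PySem.Dict Int Int × Int) iv =>
          let cols := st.1; let d1 := st.2.1; let d2 := st.2.2.1; let attacks := st.2.2.2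
          let i := iv.1; let v := iv.2
          let attacks := attacks + cols.getD v 0 + d1.getD (i - v) 0 + d2.getD (i + v) 0
          (cols.insert v (cols.getD v 0 + 1), d1.insert (i - v) (d1.getD (i - v) 0 + 1),
           d2.insert (i + v) (d2.getD (i + v) 0 + 1), attacks))
        (mkCnt (pre.map (·.2)), mkCnt (pre.map (fun p => p.1 - p.2)),
         mkCnt (pre.map (fun p => p.1 + p.2)), a0)).2.2.2
      = a0 + (rest.map (cnt pre)).sum + pairSum afInd rest := by
  have hmk : ∀ (l : List Int) (x : Int),
      mkCnt (l ++ [x]) = (mkCnt l).insert x ((mkCnt l).getD x 0 + 1) := by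
    intro l x; simp [mkCnt, List.foldl_append]
  have hget : ∀ (l : List Int) (v : Int), (mkCnt l).getD v 0 = (l.count v : Int) := by
    intro l v
    simp [mkCnt, PySem.Dict.getD_foldl_insert_add_one, PySem.Dict.getD_empty]
  induction rest with
  | nil => intro pre a0; simp [pairSum]
  | cons q rest ih =>
    intro pre a0
    rw [List.foldl_cons]
    dsimp only
    rw [← hmk, ← hmk, ← hmk, hget, hget, hget,
        show (pre.map (·.2)) ++ [q.2] = (pre ++ [q]).map (·.2) by simp,
        show (pre.map (fun p => p.1 - p.2)) ++ [q.1 - q.2] = (pre ++ [q]).map (fun p => p.1 - p.2)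
          by simp,
        show (pre.map (fun p => p.1 + p.2)) ++ [q.1 + q.2] = (pre ++ [q]).map (fun p => p.1 + p.2)
          by simp]
    rw [ih (pre ++ [q]) _]
    have hmap : rest.map (cnt (pre ++ [q])) = rest.map (fun r => cnt pre r + afInd q r) :=
      List.map_congr_left (fun r _ => cnt_append pre q r)
    rw [hmap, PySem.List.sum_map_add_int]
    simp only [List.map_cons, List.sum_cons, pairSum]
    unfold cnt
    ring

lemma resB_eq (u : List Int) :
    pvB_resilience u = numPairs (PySem.List.enumerate u 0)
      - pairSum afInd (PySem.List.enumerate u 0) := by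
  unfold pvB_resilience
  have h0 := Bfold_att (PySem.List.enumerate u 0) [] 0
  simp only [List.map_nil] at h0
  have hmk0 : mkCnt [] = PySem.Dict.empty := rfl
  rw [hmk0] at h0
  dsimp only
  rw [h0]
  have hc0 : (PySem.List.enumerate u 0).map (cnt []) =
      (PySem.List.enumerate u 0).map (fun _ => (0 : Int)) :=
    List.map_congr_left (fun r _ => by simp [cnt])
  rw [hc0, PySem.List.sum_map_const_int]
  have h2 := two_mul_numPairs (PySem.List.enumerate u 0)
  rw [PySem.List.length_enumerate] at h2
  have hdiv : PySem.Int.floordiv ((u.length : Int) * ((u.length : Int) - 1)) 2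
      = numPairs (PySem.List.enumerate u 0) := by
    rw [PySem.Int.floordiv_eq_iff_of_pos (by norm_num)]
    constructor <;> linarith
  rw [hdiv]
  ring

lemma resilience_agree (u : List Int) : pvB_resilience u = pv_calc_resilience u := by
  rw [resA_eq, resB_eq]
  have h1 := pairSum_add_pairSum (PySem.List.enumerate u 0) (PySem.List.pairwise_lt_enumerate u 0)
  linarith

-- ===== selection loop agreement =====

lemma max?_cons_cons (key : Int → Int) (a b : Int) (l : List Int) :
    PySem.List.max? (a :: b :: l) key
      = PySem.List.max? ((if key a < key b then b else a) :: l) key := by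
  simp only [PySem.List.max?, List.foldl_cons]
  by_cases h : key a < key b <;> simp [h]

lemma sel_lemma (key : Int → Int) (l : List Int) :
    ∀ idx : Int, ∃ m : Int,
      PySem.List.max? (idx :: l) key = some m
      ∧ l.foldl (fun (st : Int × Int) k =>
          if key k > st.1 then (key k, k) else st) (key idx, idx) = (key m, m) := by
  induction l with
  | nil => intro idx; exact ⟨idx, rfl, rfl⟩
  | cons x rest ih =>
    intro idx
    rw [max?_cons_cons]
    by_cases h : key idx < key x
    · simpa [List.foldl_cons, h, gt_iff_lt] using ih x
    · simpa [List.foldl_cons, h, gt_iff_lt] using ih idx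

-- ===== VERDICT (by name: the statement is the Claim_ definition above) =====
lemma resA_nonneg (u : List Int) : 0 ≤ pv_calc_resilience u := by
  rw [resA_eq]; exact pairSum_nonneg _

theorem calc_best_unity_spec : Claim_equal_calc_best_unity := by
  intro gl _ hpre
  unfold Spec_calc_best_unity calc_best_unity calc_best_unity_alt
  have hn : (0 : Int) < (gl.length : Int) := by
    have := List.length_pos_of_ne_nil hpre
    exact_mod_cast this
  have hkey : (fun k => pvB_resilience (PySem.List.pyGetD gl k []))
      = (fun k => pv_calc_resilience (PySem.List.pyGetD gl k [])) :=
    funext fun k => resilience_agree _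
  rw [hkey]
  dsimp only
  obtain ⟨m, hM, hA⟩ := sel_lemma (fun k => pv_calc_resilience (PySem.List.pyGetD gl k []))
    (PySem.List.pyRange (0 + 1) (gl.length : Int)) 0
  rw [PySem.List.pyRange_one_cons hn, List.foldl_cons]
  dsimp only
  rw [if_pos (show pv_calc_resilience (PySem.List.pyGetD gl 0 []) > (-1 : Int) from by
        have := resA_nonneg (PySem.List.pyGetD gl 0 []); omega)]
  rw [hA, hM]
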